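-- pv_equiv track=rewrite | github.com/TomaszRoksz/Cryptography | caesar_&_afinic_cypher/affine_cipher.py | is_key_correct
-- ===== SOURCE A (Python) =====
-- def is_key_correct(key):
--     a=abs(key[0])
--     if a==0: return False
--     elif a==1: return True
--     elif a<26:
--         for i in range(2,a+1):
--             if 26%i==0 and a%i==0:
--                 return False
--         return True
--     elif a>26:
--         for i in range(2,26):
--             if 26%i==0 and a%i==0:
--                 return False
--         return True
--     return False
-- ===== SOURCE B (Python) =====
-- def is_key_correct(key):
--     x = abs(key[0])
--     y = 26
--     while y != 0:
--         x, y = y, x % y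
--     return x == 1
-- ===== Notes on version B (the rewrite author's own statement) =====
-- stated objective: idiomatic
-- what changed: Replaces the trial-division scans over two divisor ranges with a single Euclidean-algorithm loop computing gcd(abs(key[0]), 26) and testing it against 1.
import Mathlib
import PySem

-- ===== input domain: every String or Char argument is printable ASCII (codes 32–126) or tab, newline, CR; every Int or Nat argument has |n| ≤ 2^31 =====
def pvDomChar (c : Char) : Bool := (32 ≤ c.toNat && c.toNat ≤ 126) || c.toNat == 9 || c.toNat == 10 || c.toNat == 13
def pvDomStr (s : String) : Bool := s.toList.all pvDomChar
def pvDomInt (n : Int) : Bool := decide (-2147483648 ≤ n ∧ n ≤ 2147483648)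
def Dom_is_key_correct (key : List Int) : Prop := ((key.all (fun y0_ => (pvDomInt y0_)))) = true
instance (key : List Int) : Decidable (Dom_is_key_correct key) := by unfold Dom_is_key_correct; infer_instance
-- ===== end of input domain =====

-- B replaces A's trial-division scans with a Euclidean gcd loop (idiomatic; same observable behaviour).


-- ===== PORT A =====
-- A: reads key[0], takes abs; for a<26 scans i in range(2,a+1), for a>26 scans i in range(2,26),
-- returning False at the first common divisor of 26 and a (the early-return loop becomes `any`, negated).
def is_key_correct (key : List Int) : Bool :=
  match PySem.List.pyGet? key 0 with
  | none => false  -- key[0] raises IndexError here; excluded by Pre_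
  | some k =>
    let a := |k|
    if a == 0 then false
    else if a == 1 then true
    else if a < 26 then
      !((PySem.List.pyRange 2 (a + 1) 1).any
          (fun i => PySem.Int.mod 26 i == 0 && PySem.Int.mod a i == 0))
    else if a > 26 then
      !((PySem.List.pyRange 2 26 1).any
          (fun i => PySem.Int.mod 26 i == 0 && PySem.Int.mod a i == 0))
    else false

-- ===== PORT B =====
-- termination helper for the Euclid loop (Python's % is fmod; its absolute value is below the divisor's)
theorem pvModNatAbsLt (x y : Int) (h : ¬ y = 0) : (PySem.Int.mod x y).natAbs < y.natAbs := by
  unfold PySem.Int.mod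
  rw [Int.fmod_eq_emod]
  have h1 := Int.emod_nonneg x h
  have h2 := Int.emod_lt x h
  split_ifs <;> omega

-- the `while y != 0: x, y = y, x % y` loop of Source B
def pvEuclid (x y : Int) : Int :=
  if h : y = 0 then x else pvEuclid y (PySem.Int.mod x y)
termination_by y.natAbs
decreasing_by exact pvModNatAbsLt x y h

def is_key_correct_alt (key : List Int) : Bool :=
  match PySem.List.pyGet? key 0 with
  | none => false  -- key[0] raises IndexError here; excluded by Pre_
  | some k => pvEuclid |k| 26 == 1

-- ===== PRECONDITION & SPEC =====
-- Pre_ excludes only the empty list, on which A (and B) raise IndexError at key[0].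
def Pre_is_key_correct (key : List Int) : Prop := key ≠ []
instance (key : List Int) : Decidable (Pre_is_key_correct key) := by unfold Pre_is_key_correct; infer_instance
def pvWitness_is_key_correct : List Int := [3]

def Spec_is_key_correct (key : List Int) (out : Bool) : Prop := out = is_key_correct_alt key
instance (key : List Int) (out : Bool) : Decidable (Spec_is_key_correct key out) := by unfold Spec_is_key_correct; infer_instance

-- ===== CLAIM (what is proved, stated in full; the proofs are below) =====
def Claim_equal_is_key_correct : Prop := ∀ (key : List Int), Dom_is_key_correct key → Pre_is_key_correct key → Spec_is_key_correct key (is_key_correct key)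

-- ===== LEMMAS AND PROOFS =====

-- the Euclid loop computes the gcd (for nonnegative arguments, which is all B feeds it)
theorem pvEuclid_eq_gcd (x y : Int) : 0 ≤ x → 0 ≤ y → pvEuclid x y = (Int.gcd x y : Int) := by
  induction x, y using pvEuclid.induct with
  | case1 x =>
    intro hx _
    rw [pvEuclid]
    simp [Int.gcd, Int.natAbs_of_nonneg hx]
  | case2 x y hny ih =>
    intro hx hy
    have hy' : (0:Int) < y := lt_of_le_of_ne hy (Ne.symm hny)
    have hm : PySem.Int.mod x y = x % y := PySem.Int.mod_eq_emod_of_pos (a := x) hy'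
    rw [pvEuclid]
    simp only [hny, dif_neg, not_false_iff]
    rw [ih hy (by rw [hm]; exact Int.emod_nonneg x hny)]
    rw [hm]
    congr 1
    simp [Int.emod_def, Int.gcd_comm y]

-- gcd(a, 26) = 1 iff neither 2 nor 13 divides a
theorem pvGcd26 (a : Int) : (Int.gcd a 26 = 1) ↔ ¬ (2 : Int) ∣ a ∧ ¬ (13 : Int) ∣ a := by
  have h2 : ((2:Int) ∣ a) ↔ (2 ∣ a.natAbs) := by
    rw [← Int.natAbs_dvd_natAbs]; norm_num
  have h13 : ((13:Int) ∣ a) ↔ (13 ∣ a.natAbs) := by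
    rw [← Int.natAbs_dvd_natAbs]; norm_num
  rw [h2, h13]
  show Nat.gcd a.natAbs 26 = 1 ↔ _
  rw [show (26:Nat) = 2 * 13 by norm_num]
  rw [← Nat.coprime_iff_gcd_eq_one, Nat.coprime_mul_iff_right]
  rw [Nat.coprime_comm (m := 2) (n := a.natAbs), Nat.coprime_comm (m := 13) (n := a.natAbs)]
  rw [Nat.Prime.coprime_iff_not_dvd Nat.prime_two,
      Nat.Prime.coprime_iff_not_dvd (by norm_num)]

-- an integer i with 2 ≤ i < 26 dividing 26 is 2 or 13
theorem pvDiv26 (i : Int) (h1 : 2 ≤ i) (h2 : i < 26) (hd : i ∣ 26) : i = 2 ∨ i = 13 := by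
  interval_cases i <;> omega

-- either trial-division scan (upper bound b) finds a hit iff 2 or 13 divides a
theorem pvScan (a b : Int)
    (hb2 : 2 < b) (hb26 : b ≤ 26) (h13 : (13:Int) ∣ a → 13 < b) :
    ((PySem.List.pyRange 2 b 1).any
        (fun i => PySem.Int.mod 26 i == 0 && PySem.Int.mod a i == 0)) =
      (decide ((2:Int) ∣ a) || decide ((13:Int) ∣ a)) := by
  rw [Bool.eq_iff_iff]
  simp only [List.any_eq_true, PySem.List.mem_pyRange_one, Bool.and_eq_true, beq_iff_eq,
    PySem.Int.mod_eq_zero_iff_dvd, Bool.or_eq_true, decide_eq_true_eq]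
  constructor
  · rintro ⟨i, ⟨hi1, hi2⟩, hd26, hda⟩
    rcases pvDiv26 i hi1 (lt_of_lt_of_le hi2 hb26) hd26 with rfl | rfl
    · exact Or.inl hda
    · exact Or.inr hda
  · rintro (hd | hd)
    · exact ⟨2, ⟨le_refl 2, hb2⟩, by decide, hd⟩
    · exact ⟨13, ⟨by norm_num, h13 hd⟩, by decide, hd⟩

-- A's branch structure equals "gcd(a,26) == 1" for the shared nonnegative value a = abs(key[0])
theorem pvMain (a : Int) (ha : 0 ≤ a) :
    (if a == 0 then false
     else if a == 1 then true
     else if a < 26 then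
       !((PySem.List.pyRange 2 (a + 1) 1).any
           (fun i => PySem.Int.mod 26 i == 0 && PySem.Int.mod a i == 0))
     else if a > 26 then
       !((PySem.List.pyRange 2 26 1).any
           (fun i => PySem.Int.mod 26 i == 0 && PySem.Int.mod a i == 0))
     else false) = (pvEuclid a 26 == 1) := by
  rw [pvEuclid_eq_gcd a 26 ha (by norm_num)]
  have hg : ((Int.gcd a 26 : Int) == 1) = decide (Int.gcd a 26 = 1) := by
    rcases Decidable.em (Int.gcd a 26 = 1) with h | h <;> simp [h]
  rw [hg]
  by_cases h0 : a = 0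
  · subst h0; decide
  by_cases h1 : a = 1
  · subst h1; decide
  have ha2 : 2 ≤ a := by omega
  by_cases hlt : a < 26
  · simp only [beq_iff_eq, h0, h1, if_false, hlt, if_true]
    rw [pvScan a (a + 1) (by omega) (by omega)
      (fun hd => by have := Int.le_of_dvd (by omega) hd; omega)]
    rcases Decidable.em ((2:Int) ∣ a) with h2 | h2 <;>
      rcases Decidable.em ((13:Int) ∣ a) with h3 | h3 <;>
        simp [h2, h3, pvGcd26]
  by_cases h26 : a = 26
  · subst h26; decide
  · have hgt : a > 26 := by omega
    simp only [beq_iff_eq, h0, h1, if_false, hlt, hgt, if_true]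
    rw [pvScan a 26 (by omega) (by omega) (fun _ => by omega)]
    rcases Decidable.em ((2:Int) ∣ a) with h2 | h2 <;>
      rcases Decidable.em ((13:Int) ∣ a) with h3 | h3 <;>
        simp [h2, h3, pvGcd26]

-- ===== VERDICT (by name: the statement is the Claim_ definition above) =====
theorem is_key_correct_spec : Claim_equal_is_key_correct := by
  intro key _ hpre
  unfold Spec_is_key_correct
  cases key with
  | nil => exact absurd rfl hpre
  | cons k t =>
    have hget : PySem.List.pyGet? (k :: t) (0 : Int) = some k := by
      simp [PySem.List.pyGet?, PySem.List.pyIdx?]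
    simp only [is_key_correct, is_key_correct_alt, hget]
    exact pvMain |k| (abs_nonneg k)
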